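-- pv_equiv track=rewrite | github.com/OpenAPITools/openapi-generator | samples/openapi3/client/petstore/python-experimental/venv/lib/python3.8/site-packages/mypy/stubdoc.py | find_unique_signatures
-- ===== SOURCE A (Python) =====
-- from typing import (
--     Optional, MutableMapping, MutableSequence, List, Sequence, Tuple, NamedTuple, Any
-- )
--
-- Sig = Tuple[str, str]
--
-- def find_unique_signatures(sigs: Sequence[Sig]) -> List[Sig]:
--     """Remove names with duplicate found signatures."""
--     sig_map = {}  # type: MutableMapping[str, List[str]]
--     for name, sig in sigs:
--         sig_map.setdefault(name, []).append(sig)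
--
--     result = []
--     for name, name_sigs in sig_map.items():
--         if len(set(name_sigs)) == 1:
--             result.append((name, name_sigs[0]))
--     return sorted(result)
-- ===== SOURCE B (Python) =====
-- from typing import List, Sequence, Tuple
--
-- Sig = Tuple[str, str]
--
-- def find_unique_signatures(sigs: Sequence[Sig]) -> List[Sig]:
--     """Remove names with duplicate found signatures."""
--     first_sig = {}
--     conflicted = set()
--     for name, sig in sigs:
--         if name not in first_sig:
--             first_sig[name] = sig
--         elif first_sig[name] != sig:
--             conflicted.add(name)
--     return sorted((name, s) for name, s in first_sig.items() if name not in conflicted)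
-- ===== Notes on version B (the rewrite author's own statement) =====
-- stated objective: alternative
-- what changed: A groups every signature of each name into per-name lists and afterwards keeps names whose list collapses to a one-element set; B makes a single pass that stores only the first signature per name and a set of names seen with a differing signature, so no per-name lists are ever materialised.
import Mathlib
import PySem

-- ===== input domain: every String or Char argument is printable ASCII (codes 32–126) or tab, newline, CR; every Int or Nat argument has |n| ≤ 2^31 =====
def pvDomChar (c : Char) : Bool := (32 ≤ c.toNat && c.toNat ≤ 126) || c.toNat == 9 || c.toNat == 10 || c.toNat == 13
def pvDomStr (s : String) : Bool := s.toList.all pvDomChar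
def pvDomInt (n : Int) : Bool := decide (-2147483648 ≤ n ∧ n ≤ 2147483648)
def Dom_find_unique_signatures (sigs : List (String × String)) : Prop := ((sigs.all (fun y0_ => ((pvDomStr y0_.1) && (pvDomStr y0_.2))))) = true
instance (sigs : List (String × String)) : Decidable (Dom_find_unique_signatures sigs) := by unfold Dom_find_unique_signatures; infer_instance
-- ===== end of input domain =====

-- B replaces A's per-name signature lists (built, then filtered by set size) with a single
-- pass keeping the first signature per name plus a set of conflicted names (alternative decomposition).


-- ===== PORT A =====
-- sig_map.setdefault(name, []).append(sig)  =  modify name [] (· ++ [sig])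
def find_unique_signatures (sigs : List (String × String)) : List (String × String) :=
  let sig_map : PySem.Dict String (List String) :=
    sigs.foldl (fun d p => d.modify p.1 [] (· ++ [p.2])) PySem.Dict.empty
  let result : List (String × String) :=
    sig_map.items.foldl (fun acc q =>
      if PySem.Set.len (PySem.Set.ofList q.2) = 1 then acc ++ [(q.1, q.2.headD "")] else acc) []
  PySem.List.sorted2 result (·.1) (·.2) false

-- ===== PORT B =====
def find_unique_signatures_alt (sigs : List (String × String)) : List (String × String) :=
  let st : PySem.Dict String String × PySem.Set String :=
    sigs.foldl (fun st p =>
      if st.1.contains p.1 = false then (st.1.insert p.1 p.2, st.2)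
      else if st.1.getD p.1 "" ≠ p.2 then (st.1, st.2.add p.1)
      else st)
      (PySem.Dict.empty, PySem.Set.empty)
  PySem.List.sorted2 (st.1.items.filter (fun q => !(PySem.Set.contains st.2 q.1))) (·.1) (·.2) false

-- ===== PRECONDITION & SPEC =====
def Spec_find_unique_signatures (sigs : List (String × String)) (out : List (String × String)) : Prop := out = find_unique_signatures_alt sigs
instance (sigs : List (String × String)) (out : List (String × String)) : Decidable (Spec_find_unique_signatures sigs out) := by unfold Spec_find_unique_signatures; infer_instance

-- ===== CLAIM (what is proved, stated in full; the proofs are below) =====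
def Claim_equal_find_unique_signatures : Prop := ∀ (sigs : List (String × String)), Dom_find_unique_signatures sigs → Spec_find_unique_signatures sigs (find_unique_signatures sigs)

-- ===== LEMMAS AND PROOFS =====

-- Coupled invariant between A's grouping dict d and B's state (first-signature dict f, conflicted set c):
-- f holds the head of each of d's signature lists, d's lists are nonempty, and c holds exactly the
-- names whose list in d contains a signature differing from its first.
def pvInv (d : PySem.Dict String (List String))
    (f : PySem.Dict String String) (c : PySem.Set String) : Prop :=
  d.keys.Nodup ∧
  f.items = d.items.map (fun q => (q.1, q.2.headD "")) ∧
  (∀ q ∈ d.items, q.2 ≠ []) ∧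
  (∀ n : String, n ∈ c ↔ ∃ ls, d.get? n = some ls ∧ ∃ s ∈ ls, s ≠ ls.headD "")

theorem pvInv_init : pvInv PySem.Dict.empty PySem.Dict.empty PySem.Set.empty := by
  refine ⟨by simp [PySem.Dict.keys, PySem.Dict.empty], rfl,
    by intro q hq; simp [PySem.Dict.empty] at hq, ?_⟩
  intro n
  simp [PySem.Set.empty, PySem.Dict.get?_empty]

theorem pv_keys_eq {d : PySem.Dict String (List String)} {f : PySem.Dict String String}
    (h : f.items = d.items.map (fun q => (q.1, q.2.headD ""))) : f.keys = d.keys := by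
  simp only [PySem.Dict.keys, h, List.map_map]
  rfl

theorem pvInv_step (d : PySem.Dict String (List String))
    (f : PySem.Dict String String) (c : PySem.Set String) (p : String × String)
    (h : pvInv d f c) :
    pvInv (d.modify p.1 [] (· ++ [p.2]))
      (if f.contains p.1 = false then (f.insert p.1 p.2, c)
       else if f.getD p.1 "" ≠ p.2 then (f, c.add p.1) else (f, c)).1
      (if f.contains p.1 = false then (f.insert p.1 p.2, c)
       else if f.getD p.1 "" ≠ p.2 then (f, c.add p.1) else (f, c)).2 := by
  obtain ⟨hnd, hf, hne, hc⟩ := h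
  have hkeys : f.keys = d.keys := pv_keys_eq hf
  have hcont : f.contains p.1 = d.contains p.1 := by
    rw [PySem.Dict.contains_eq_decide_mem_keys, PySem.Dict.contains_eq_decide_mem_keys, hkeys]
  by_cases hmem : d.contains p.1 = true
  · -- key already present: A appends to the list, B's dict is unchanged
    obtain ⟨ls, hls⟩ : ∃ ls, d.get? p.1 = some ls :=
      Option.isSome_iff_exists.mp (by rw [← PySem.Dict.contains_eq_isSome_get?]; exact hmem)
    have hlsne : ls ≠ [] := hne _ (PySem.Dict.mem_items_of_get?_eq_some _ hls)
    have hgetD : d.getD p.1 [] = ls := PySem.Dict.getD_of_get?_eq_some d [] hls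
    have hfgetD : f.getD p.1 "" = ls.headD "" := by
      have hm : (p.1, ls.headD "") ∈ f.items := by
        rw [hf]
        exact List.mem_map.mpr ⟨(p.1, ls), PySem.Dict.mem_items_of_get?_eq_some _ hls, rfl⟩
      exact PySem.Dict.getD_of_mem_items _ hm (by rw [hkeys]; exact hnd) _
    have hmod : d.modify p.1 [] (· ++ [p.2]) = d.insert p.1 (ls ++ [p.2]) := by
      simp [PySem.Dict.modify, hgetD]
    have hnd' : (d.insert p.1 (ls ++ [p.2])).keys.Nodup := by
      rw [PySem.Dict.keys_insert_of_contains _ _ hmem]; exact hnd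
    have hitems : (d.insert p.1 (ls ++ [p.2])).items
        = d.items.map (fun q => if (q.1 == p.1) = true then (p.1, ls ++ [p.2]) else q) :=
      PySem.Dict.items_insert_of_contains _ _ hmem
    have hhead : (ls ++ [p.2]).headD "" = ls.headD "" := by
      cases ls with
      | nil => exact absurd rfl hlsne
      | cons a t => rfl
    have hfitems : f.items = (d.insert p.1 (ls ++ [p.2])).items.map (fun q => (q.1, q.2.headD "")) := by
      rw [hitems, List.map_map, hf]
      apply List.map_congr_left
      intro q hq
      by_cases hq1 : q.1 = p.1
      · have hqe : q = (p.1, ls) := by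
          have h2 : d.get? q.1 = some q.2 := PySem.Dict.get?_of_mem_items _ hq hnd
          rw [hq1, hls] at h2
          obtain ⟨q1, q2⟩ := q
          simp at h2 hq1
          simp [hq1, h2]
        subst hqe
        have hh : ls.head?.getD "" = ls.head?.getD p.2 := by
          cases ls with
          | nil => exact absurd rfl hlsne
          | cons a t => rfl
        simp [hh]
      · simp [Function.comp, hq1]
    have hnewne : ∀ q ∈ (d.insert p.1 (ls ++ [p.2])).items, q.2 ≠ [] := by
      intro q hq
      rw [hitems] at hq
      rcases List.mem_map.mp hq with ⟨q', hq', hq'eq⟩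
      by_cases h1 : (q'.1 == p.1) = true
      · simp only [h1] at hq'eq
        subst hq'eq; simp
      · simp only [h1] at hq'eq
        simp at hq'eq
        subst hq'eq; exact hne _ hq'
    have hget' : ∀ n, (d.insert p.1 (ls ++ [p.2])).get? n
        = if n = p.1 then some (ls ++ [p.2]) else d.get? n :=
      fun n => PySem.Dict.get?_insert d p.1 n (ls ++ [p.2])
    rw [hmod]
    rw [hcont]
    simp only [hmem, Bool.true_eq_false, if_false, hfgetD]
    by_cases hdiff : ls.headD "" ≠ p.2
    · simp only [if_pos hdiff]
      refine ⟨hnd', hfitems, hnewne, ?_⟩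
      intro n
      rw [PySem.Set.mem_add, hc, hget' n]
      by_cases hnp : n = p.1
      · subst hnp
        rw [if_pos rfl]
        constructor
        · intro _
          exact ⟨ls ++ [p.2], rfl, p.2, by simp, by rw [hhead]; exact fun h => hdiff h.symm⟩
        · intro _; right; rfl
      · simp only [if_neg hnp]
        constructor
        · rintro (h | h)
          · exact h
          · exact absurd h hnp
        · exact Or.inl
    · simp only [if_neg hdiff]
      rw [not_ne_iff] at hdiff
      refine ⟨hnd', hfitems, hnewne, ?_⟩
      intro n
      rw [hc, hget' n]
      by_cases hnp : n = p.1
      · subst hnp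
        rw [if_pos rfl]
        constructor
        · rintro ⟨ls', hls', s, hs, hsne⟩
          rw [hls, Option.some.injEq] at hls'
          subst hls'
          exact ⟨ls ++ [p.2], rfl, s, by simp [hs], by rw [hhead]; exact hsne⟩
        · rintro ⟨ls', hls', s, hs, hsne⟩
          rw [Option.some.injEq] at hls'
          subst hls'
          rw [hhead] at hsne
          rcases List.mem_append.mp hs with h | h
          · exact ⟨ls, hls, s, h, hsne⟩
          · simp at h; subst h; exact absurd hdiff.symm hsne
      · simp only [if_neg hnp]
  · -- fresh key: both sides append a new entry, c is unchanged
    have hmem' : d.contains p.1 = false := by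
      cases h : d.contains p.1
      · rfl
      · exact absurd h hmem
    have hgetnone : d.get? p.1 = none := by
      rw [PySem.Dict.get?_eq_none_iff_contains]; exact hmem'
    have hmod : d.modify p.1 [] (· ++ [p.2]) = d.insert p.1 [p.2] := by
      simp [PySem.Dict.modify, PySem.Dict.getD_of_get?_eq_none d _ hgetnone]
    have hitems := PySem.Dict.items_insert_of_not_contains d [p.2] hmem'
    have hfitems' := PySem.Dict.items_insert_of_not_contains f p.2 (by rw [hcont]; exact hmem')
    have hnotkeys : p.1 ∉ d.keys := by
      intro hx
      rw [PySem.Dict.contains_eq_decide_mem_keys] at hmem'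
      simp at hmem'
      exact hmem' hx
    rw [hmod, hcont, if_pos hmem']
    refine ⟨?_, ?_, ?_, ?_⟩
    · rw [PySem.Dict.keys_insert_of_not_contains _ _ hmem']
      rw [List.nodup_append]
      refine ⟨hnd, List.nodup_singleton _, ?_⟩
      intro a ha b hb
      simp only [List.mem_singleton] at hb
      subst hb
      intro hab; subst hab
      exact hnotkeys ha
    · rw [hitems, hfitems', List.map_append, hf]
      rfl
    · intro q hq
      rw [hitems] at hq
      rcases List.mem_append.mp hq with h | h
      · exact hne _ h
      · simp at h; subst h; simp
    · intro n
      rw [hc]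
      rw [PySem.Dict.get?_insert d p.1 n [p.2]]
      by_cases hnp : n = p.1
      · subst hnp
        rw [if_pos rfl]
        constructor
        · rintro ⟨ls, h', _⟩
          rw [hgetnone] at h'
          cases h'
        · rintro ⟨ls, hls2, s, hs, hsne⟩
          rw [Option.some.injEq] at hls2
          subst hls2
          simp at hs; subst hs
          exact absurd rfl hsne
      · rw [if_neg hnp]

theorem pvInv_fold (sigs : List (String × String)) (d : PySem.Dict String (List String))
    (f : PySem.Dict String String) (c : PySem.Set String) (h : pvInv d f c) :
    pvInv (sigs.foldl (fun d p => d.modify p.1 [] (· ++ [p.2])) d)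
      ((sigs.foldl (fun st p =>
          if st.1.contains p.1 = false then (st.1.insert p.1 p.2, st.2)
          else if st.1.getD p.1 "" ≠ p.2 then (st.1, st.2.add p.1)
          else st) (f, c)).1)
      ((sigs.foldl (fun st p =>
          if st.1.contains p.1 = false then (st.1.insert p.1 p.2, st.2)
          else if st.1.getD p.1 "" ≠ p.2 then (st.1, st.2.add p.1)
          else st) (f, c)).2) := by
  induction sigs generalizing d f c with
  | nil => exact h
  | cons p t ih =>
    have hstep := pvInv_step d f c p h
    simp only [List.foldl_cons]
    by_cases h1 : f.contains p.1 = false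
    · rw [if_pos h1] at hstep ⊢
      exact ih _ _ _ hstep
    · rw [if_neg h1] at hstep ⊢
      by_cases h2 : f.getD p.1 "" ≠ p.2
      · rw [if_pos h2] at hstep ⊢
        exact ih _ _ _ hstep
      · rw [if_neg h2] at hstep ⊢
        exact ih _ _ _ hstep

-- len(set(ls)) == 1  ↔  every element equals the first (for nonempty ls)
theorem pv_set_len_one (ls : List String) (h : ls ≠ []) :
    (PySem.Set.len (PySem.Set.ofList ls) = 1) ↔ ∀ s ∈ ls, s = ls.headD "" := by
  cases ls with
  | nil => exact absurd rfl h
  | cons a t =>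
    rw [PySem.Set.ofList_cons]
    simp only [PySem.Set.len, List.headD_cons]
    constructor
    · intro hlen s hs
      have hnil : (PySem.Set.ofList t).discard a = [] := by
        have hl : ((PySem.Set.ofList t).discard a).length = 0 := by
          simp only [List.length_cons] at hlen
          omega
        exact List.eq_nil_of_length_eq_zero hl
      rcases List.mem_cons.mp hs with h' | h'
      · exact h'
      · by_contra hne
        have hmem : s ∈ (PySem.Set.ofList t).discard a :=
          (PySem.Set.mem_discard _ _ _).mpr ⟨(PySem.Set.mem_ofList _ _).mpr h', hne⟩
        rw [hnil] at hmem
        cases hmem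
    · intro hall
      have hnil : (PySem.Set.ofList t).discard a = [] := by
        rw [List.eq_nil_iff_forall_not_mem]
        intro s hs
        rcases (PySem.Set.mem_discard _ _ _).mp hs with ⟨hs', hne⟩
        exact hne (hall s (List.mem_cons_of_mem _ ((PySem.Set.mem_ofList _ _).mp hs')))
      rw [hnil]
      rfl

theorem pv_main (sigs : List (String × String)) :
    find_unique_signatures sigs = find_unique_signatures_alt sigs := by
  have hinv := pvInv_fold sigs PySem.Dict.empty PySem.Dict.empty PySem.Set.empty pvInv_init
  obtain ⟨hnd, hf, hne, hc⟩ := hinv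
  show PySem.List.sorted2
      ((sigs.foldl (fun d p => d.modify p.1 [] (· ++ [p.2])) PySem.Dict.empty).items.foldl
        (fun acc q => if PySem.Set.len (PySem.Set.ofList q.2) = 1 then acc ++ [(q.1, q.2.headD "")] else acc) [])
      (·.1) (·.2) false
    = PySem.List.sorted2
      (((sigs.foldl (fun st p =>
          if st.1.contains p.1 = false then (st.1.insert p.1 p.2, st.2)
          else if st.1.getD p.1 "" ≠ p.2 then (st.1, st.2.add p.1)
          else st) (PySem.Dict.empty, PySem.Set.empty)).1.items).filter
        (fun q => !(PySem.Set.contains (sigs.foldl (fun st p =>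
          if st.1.contains p.1 = false then (st.1.insert p.1 p.2, st.2)
          else if st.1.getD p.1 "" ≠ p.2 then (st.1, st.2.add p.1)
          else st) (PySem.Dict.empty, PySem.Set.empty)).2 q.1)))
      (·.1) (·.2) false
  set st := sigs.foldl (fun st p =>
      if st.1.contains p.1 = false then (st.1.insert p.1 p.2, st.2)
      else if st.1.getD p.1 "" ≠ p.2 then (st.1, st.2.add p.1)
      else st) (PySem.Dict.empty, PySem.Set.empty) with hstdef
  set d := sigs.foldl (fun d p => d.modify p.1 [] (· ++ [p.2])) PySem.Dict.empty with hddef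
  rw [PySem.List.foldl_append_ite
      (fun q : String × List String => PySem.Set.len (PySem.Set.ofList q.2) = 1)
      (fun q => (q.1, q.2.headD ""))]
  rw [hf, List.filter_map, List.nil_append]
  congr 1
  apply congrArg
  apply List.filter_congr
  intro q hq
  have hget : d.get? q.1 = some q.2 := PySem.Dict.get?_of_mem_items _ hq hnd
  have hqne : q.2 ≠ [] := hne _ hq
  by_cases hone : PySem.Set.len (PySem.Set.ofList q.2) = 1
  · have hall := (pv_set_len_one q.2 hqne).mp hone
    have hnotc : ¬ (PySem.Set.contains st.2 q.1 = true) := by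
      rw [PySem.Set.contains_iff, hc q.1]
      rintro ⟨ls, hls, s, hs, hsne⟩
      rw [hget, Option.some.injEq] at hls
      subst hls
      exact hsne (hall s hs)
    simp only [decide_eq_true hone, Function.comp]
    cases hcc : PySem.Set.contains st.2 q.1
    · rfl
    · exact absurd hcc hnotc
  · have hex : ∃ s ∈ q.2, s ≠ q.2.headD "" := by
      by_contra hno
      refine hone ((pv_set_len_one q.2 hqne).mpr fun s hs => ?_)
      by_contra hne'
      exact hno ⟨s, hs, hne'⟩
    have hcc : PySem.Set.contains st.2 q.1 = true := by
      rw [PySem.Set.contains_iff, hc q.1]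
      exact ⟨q.2, hget, hex⟩
    simp only [decide_eq_false hone, Function.comp, hcc, Bool.not_true]

-- ===== VERDICT (by name: the statement is the Claim_ definition above) =====
theorem find_unique_signatures_spec : Claim_equal_find_unique_signatures := by
  intro sigs _
  exact pv_main sigs
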